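-- pv_equiv track=rewrite | github.com/israncho/evo_bio_computing | src/continuous/binary_representation.py | decode_aux
-- ===== SOURCE A (Python) =====
-- from typing import List, Tuple
--
-- def decode_aux(bits: List[int], n_bits: int,
--                initial_bit_index: int = 0) -> int:
--     """
--     Decode a list of bits into an integer.
--     Args:
--         bits (List[int]): List of bits to decode, least significant
--             bit must be at the start of the list
--         n_bits (int): Number of bits used for decoding.
--         initial_bit_index (int): Starting index for decoding, only
--             in case of decoding a vector.
--     Returns:
--         int: The decoded natural number.
--     """
--     decoded_num = 0
--     i = 0
--     for j in range(initial_bit_index, initial_bit_index + n_bits):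
--         decoded_num += bits[j] * 2**i
--         i += 1
--     return decoded_num
-- ===== SOURCE B (Python) =====
-- from typing import List, Tuple
--
-- def decode_aux(bits: List[int], n_bits: int,
--                initial_bit_index: int = 0) -> int:
--     """Divide and conquer: decode the two halves of the window and
--     combine them as low + high * 2**(len of low half)."""
--     if n_bits <= 0:
--         return 0
--     if n_bits == 1:
--         return bits[initial_bit_index]
--     half = n_bits // 2
--     low = decode_aux(bits, half, initial_bit_index)
--     high = decode_aux(bits, n_bits - half, initial_bit_index + half)
--     return low + high * (1 << half)
-- ===== Notes on version B (the rewrite author's own statement) =====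
-- stated objective: faster
-- what changed: Replaced A's iterative LSB-first weighted sum (explicit 2**i weights and an index counter over a range loop) by a divide-and-conquer recursion: decode the two halves of the bit window and combine them as low + high * 2**half.
import Mathlib
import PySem

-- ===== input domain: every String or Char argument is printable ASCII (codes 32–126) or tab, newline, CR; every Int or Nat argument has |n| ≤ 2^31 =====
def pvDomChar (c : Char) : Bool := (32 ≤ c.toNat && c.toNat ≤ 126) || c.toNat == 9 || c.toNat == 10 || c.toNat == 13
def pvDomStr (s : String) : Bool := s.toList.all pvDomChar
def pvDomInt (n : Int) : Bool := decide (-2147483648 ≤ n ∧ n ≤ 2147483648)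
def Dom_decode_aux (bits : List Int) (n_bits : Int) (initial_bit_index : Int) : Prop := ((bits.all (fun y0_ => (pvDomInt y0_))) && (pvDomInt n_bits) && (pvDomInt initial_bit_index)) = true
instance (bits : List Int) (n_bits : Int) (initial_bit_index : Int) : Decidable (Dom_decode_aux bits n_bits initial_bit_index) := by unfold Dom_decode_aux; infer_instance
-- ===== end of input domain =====

-- B replaces A's iterative LSB-first weighted sum (2**i weights, index counter) by a
-- divide-and-conquer recursion: decode the two halves of the window and combine them as
-- low + high * 2**half (objective: faster — combining halves avoids A's per-step 2**i).

-- ===== PORT A =====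
-- decoded = 0; i = 0
-- for j in range(init, init + n_bits): decoded += bits[j] * 2**i; i += 1
def decode_aux (bits : List Int) (n_bits : Int) (initial_bit_index : Int) : Int :=
  ((PySem.List.pyRange initial_bit_index (initial_bit_index + n_bits) 1).foldl
    (fun (st : Int × Nat) j => (st.1 + PySem.List.pyGetD bits j 0 * 2 ^ st.2, st.2 + 1))
    (0, 0)).1

-- ===== PORT B =====
-- if n_bits <= 0: return 0
-- if n_bits == 1: return bits[init]
-- half = n_bits // 2
-- return decode_aux(bits, half, init) + decode_aux(bits, n_bits - half, init + half) * (1 << half)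
-- (the recursion descends on n_bits; in Lean the decreasing measure is n_bits.toNat; for
--  n_bits ≥ 2, Python's n_bits // 2 equals Nat division and 1 << half equals 2 ^ half)
def pvDecodeDC (bits : List Int) : Nat → Int → Int
  | 0, _ => 0
  | 1, i => PySem.List.pyGetD bits i 0
  | (n + 2), i =>
      let half := (n + 2) / 2
      pvDecodeDC bits half i + pvDecodeDC bits ((n + 2) - half) (i + half) * 2 ^ half
decreasing_by all_goals omega

def decode_aux_alt (bits : List Int) (n_bits : Int) (initial_bit_index : Int) : Int :=
  pvDecodeDC bits n_bits.toNat initial_bit_index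

-- ===== PRECONDITION & SPEC =====
-- Pre_ excludes exactly the inputs on which Python A raises IndexError (some index of the
-- decoded window outside [-len, len)); B raises on the very same inputs.
def Pre_decode_aux (bits : List Int) (n_bits : Int) (initial_bit_index : Int) : Prop :=
  n_bits ≤ 0 ∨ (-(bits.length : Int) ≤ initial_bit_index ∧ initial_bit_index + n_bits ≤ bits.length)
instance (bits : List Int) (n_bits : Int) (initial_bit_index : Int) : Decidable (Pre_decode_aux bits n_bits initial_bit_index) := by unfold Pre_decode_aux; infer_instance
def pvWitness_decode_aux : List Int × Int × Int := ([1, 0, 1, 1], 3, 1)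

def Spec_decode_aux (bits : List Int) (n_bits : Int) (initial_bit_index : Int) (out : Int) : Prop := out = decode_aux_alt bits n_bits initial_bit_index
instance (bits : List Int) (n_bits : Int) (initial_bit_index : Int) (out : Int) : Decidable (Spec_decode_aux bits n_bits initial_bit_index out) := by unfold Spec_decode_aux; infer_instance

-- ===== CLAIM (what is proved, stated in full; the proofs are below) =====
def Claim_equal_decode_aux : Prop := ∀ (bits : List Int) (n_bits : Int) (initial_bit_index : Int), Dom_decode_aux bits n_bits initial_bit_index → Pre_decode_aux bits n_bits initial_bit_index → Spec_decode_aux bits n_bits initial_bit_index (decode_aux bits n_bits initial_bit_index)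

-- ===== LEMMAS AND PROOFS =====

-- decoded value of an index list, LSB first (the common denotation of both ports)
def pvH (g : Int → Int) (L : List Int) : Int :=
  L.foldr (fun j acc => g j + 2 * acc) 0

-- A's fold over any index list, with the running power made explicit
theorem pvA_fold (g : Int → Int) (L : List Int) : ∀ (s : Int) (i : Nat),
    (L.foldl (fun (st : Int × Nat) j => (st.1 + g j * 2 ^ st.2, st.2 + 1)) (s, i)).1
      = s + 2 ^ i * pvH g L := by
  induction L with
  | nil => intro s i; simp [pvH]
  | cons j L ih =>
      intro s i
      simp only [List.foldl_cons, pvH, List.foldr_cons, ih, pow_succ]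
      simp only [pvH] at ih
      ring

theorem pvH_append (g : Int → Int) (L1 L2 : List Int) :
    pvH g (L1 ++ L2) = pvH g L1 + 2 ^ L1.length * pvH g L2 := by
  induction L1 with
  | nil => simp [pvH]
  | cons j L ih =>
      simp only [pvH, List.cons_append, List.foldr_cons, List.length_cons, pow_succ] at *
      rw [ih]; ring

-- B's divide-and-conquer recursion computes pvH over the range of indices
theorem pvB_rec (bits : List Int) : ∀ (n : Nat) (a : Int),
    pvDecodeDC bits n a
      = pvH (fun j => PySem.List.pyGetD bits j 0) (PySem.List.pyRange a (a + n) 1) := by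
  intro n
  induction n using Nat.strong_induction_on with
  | _ n ih =>
    match n with
    | 0 =>
        intro a
        simp [pvDecodeDC, pvH]
    | 1 =>
        intro a
        rw [pvDecodeDC]
        rw [show a + (1 : Nat) = a + 1 by push_cast; ring, PySem.List.pyRange_one_singleton]
        simp [pvH]
    | (m + 2) =>
        intro a
        rw [pvDecodeDC]
        have hsplit : PySem.List.pyRange a (a + (m + 2 : Nat)) 1
            = PySem.List.pyRange a (a + ((m + 2) / 2 : Nat)) 1
              ++ PySem.List.pyRange (a + ((m + 2) / 2 : Nat)) (a + (m + 2 : Nat)) 1 :=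
          PySem.List.pyRange_one_append _ _ _ (by push_cast; omega) (by push_cast; omega)
        rw [hsplit, pvH_append]
        rw [ih ((m + 2) / 2) (by omega), ih ((m + 2) - (m + 2) / 2) (by omega)]
        have hlen : (PySem.List.pyRange a (a + ((m + 2) / 2 : Nat)) 1).length
            = (m + 2) / 2 := by
          rw [PySem.List.length_pyRange_one]; omega
        rw [hlen]
        have harg : a + ((m + 2) / 2 : Nat) + ((m + 2) - (m + 2) / 2 : Nat)
            = a + (m + 2 : Nat) := by push_cast; omega
        rw [harg]; ring

-- ===== VERDICT (by name: the statement is the Claim_ definition above) =====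
theorem decode_aux_spec : Claim_equal_decode_aux := by
  intro bits n_bits init _ _
  unfold Spec_decode_aux decode_aux decode_aux_alt
  rw [pvA_fold, pvB_rec]
  by_cases h : n_bits ≤ 0
  · have h0 : n_bits.toNat = 0 := by omega
    simp [h0, pvH, PySem.List.pyRange_one]
  · rw [Int.toNat_of_nonneg (by omega)]; simp
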